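-- pv_equiv track=rewrite | github.com/KostasEreksonas/Codewars-kata-solutions | 7kyu/Python/square_every_digit.py | square_digits
-- ===== SOURCE A (Python) =====
-- def square_digits(num):
--     if num == 0:
--         return 0
--     else:
--         digits = []
--         z = ''
--         while num != 0:
--             digits.append((num%10)**2)
--             num //= 10
--         digits = digits[::-1]
--         z = [str(d) for d in digits]
--         return int(''.join(z))
-- ===== SOURCE B (Python) =====
-- def square_digits(num):
--     return int(''.join(str(int(c) ** 2) for c in str(num)))
-- ===== Notes on version B (the rewrite author's own statement) =====
-- stated objective: idiomatic
-- what changed: B iterates over the decimal string of num and squares each character's digit, replacing A's modulo/floor-division digit-extraction loop, the list reversal and the zero special-case with a single string comprehension.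
import Mathlib
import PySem

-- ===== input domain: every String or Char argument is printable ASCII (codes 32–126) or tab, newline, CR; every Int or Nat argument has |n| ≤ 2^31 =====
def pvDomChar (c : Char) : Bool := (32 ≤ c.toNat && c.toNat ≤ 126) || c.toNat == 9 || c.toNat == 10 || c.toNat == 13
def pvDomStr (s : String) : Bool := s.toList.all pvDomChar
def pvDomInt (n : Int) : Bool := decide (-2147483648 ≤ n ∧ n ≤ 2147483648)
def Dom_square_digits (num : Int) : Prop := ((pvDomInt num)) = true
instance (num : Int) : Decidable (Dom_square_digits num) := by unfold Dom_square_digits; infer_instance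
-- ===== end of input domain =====

-- B squares each character of str(num) instead of A's modulo/floor-division digit
-- loop plus reversal (idiomatic; same asymptotic cost). Pre_ restricts to num ≥ 0:
-- on negative num Python A's while-loop never terminates (num //= 10 stalls at -1)
-- and B raises ValueError, so no return value of A exists there.


-- ===== PORT A =====
-- A's while-loop. Under Pre_ (num ≥ 0) Python's num % 10 and num //= 10 coincide
-- with Nat % and /, so the loop is transcribed over the Nat value of num (for
-- num < 0 the Python loop never terminates, which Pre_ excludes).
def sdLoopA : Nat → List Int → List Int
  | 0, acc => acc
  | n+1, acc => sdLoopA ((n+1)/10) (acc ++ [((((n+1) % 10 : Nat) : Int))^2])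
decreasing_by exact Nat.div_lt_self (Nat.succ_pos n) (by norm_num)

def square_digits (num : Int) : Int :=
  if num = 0 then 0
  else
    let digits := sdLoopA num.toNat []
    let digits := (PySem.List.slice? digits none none (-1)).getD []   -- digits[::-1]
    let z := digits.map PySem.Int.toStr
    (PySem.Int.ofStr? (PySem.Str.join "" z)).getD 0   -- int(''.join(z)); getD unreachable under Pre_

-- ===== PORT B =====
def square_digits_alt (num : Int) : Int :=
  (PySem.Int.ofStr? (PySem.Str.join ""
    ((PySem.Int.toStr num).toList.map
      (fun c => PySem.Int.toStr (((PySem.Int.ofStr? (String.ofList [c])).getD 0) ^ 2))))).getD 0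
  -- int(''.join(str(int(c)**2) for c in str(num))); getD unreachable under Pre_

-- ===== PRECONDITION & SPEC =====
-- Pre_ excludes negative num, where Python A's while-loop never terminates
-- (so A returns no value) and B raises ValueError.
def Pre_square_digits (num : Int) : Prop := 0 ≤ num
instance (num : Int) : Decidable (Pre_square_digits num) := by unfold Pre_square_digits; infer_instance
def pvWitness_square_digits : Int := (9119)

def Spec_square_digits (num : Int) (out : Int) : Prop := out = square_digits_alt num
instance (num : Int) (out : Int) : Decidable (Spec_square_digits num out) := by unfold Spec_square_digits; infer_instance

-- ===== CLAIM (what is proved, stated in full; the proofs are below) =====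
def Claim_equal_square_digits : Prop := ∀ (num : Int), Dom_square_digits num → Pre_square_digits num → Spec_square_digits num (square_digits num)

-- ===== LEMMAS AND PROOFS =====

-- A's loop collects the squared base-10 digits, least significant first.
lemma sdLoopA_eq (n : Nat) : ∀ acc, sdLoopA n acc = acc ++ (Nat.digits 10 n).map (fun d : Nat => ((d : Int))^2) := by
  induction n using Nat.strong_induction_on with
  | _ n ih =>
    intro acc
    match n with
    | 0 => simp [sdLoopA]
    | n+1 =>
      rw [sdLoopA, ih ((n+1)/10) (Nat.div_lt_self (Nat.succ_pos n) (by norm_num)),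
        Nat.digits_def' (by norm_num : 1 < 10) (Nat.succ_pos n)]
      simp

-- Core of Nat.toDigits: the characters are the base-10 digits, most significant first.
lemma toDigitsCore_eq (f : Nat) : ∀ (n : Nat) (acc : List Char), 0 < n → n < 10 ^ f →
    Nat.toDigitsCore 10 f n acc = ((Nat.digits 10 n).map Nat.digitChar).reverse ++ acc := by
  induction f with
  | zero => intro n acc h1 h2; omega
  | succ f ih =>
    intro n acc h1 h2
    rw [Nat.toDigitsCore]
    by_cases h : n / 10 = 0
    · have hn : n < 10 := by omega
      simp only [h, if_true]
      rw [Nat.digits_def' (by norm_num : 1 < 10) h1, h]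
      simp
    · simp only [h, if_false]
      rw [ih (n / 10) _ (Nat.pos_of_ne_zero h)
        (by rw [Nat.div_lt_iff_lt_mul (by norm_num)]; calc n < 10 ^ (f+1) := h2
            _ = 10 ^ f * 10 := by ring),
        Nat.digits_def' (by norm_num : 1 < 10) h1]
      simp

lemma toDigits_eq (n : Nat) (h : 0 < n) :
    Nat.toDigits 10 n = ((Nat.digits 10 n).map Nat.digitChar).reverse := by
  have hb : n < 10 ^ (n + 1) :=
    lt_of_lt_of_le (Nat.lt_pow_self (by norm_num)) (Nat.pow_le_pow_right (by norm_num) (Nat.le_succ n))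
  rw [Nat.toDigits, toDigitsCore_eq (n+1) n [] h hb, List.append_nil]

-- int(c) for a single digit character.
lemma digitChar_val (d : Nat) (hd : d < 10) :
    (PySem.Int.ofStr? (String.ofList [Nat.digitChar d])).getD 0 = (d : Int) := by
  interval_cases d <;> decide

-- ===== VERDICT (by name: the statement is the Claim_ definition above) =====
theorem square_digits_spec : Claim_equal_square_digits := by
  intro num _ hpre
  unfold Spec_square_digits
  by_cases h0 : num = 0
  · subst h0; decide
  · -- num > 0
    obtain ⟨n, rfl⟩ := Int.eq_ofNat_of_zero_le hpre
    have hn : 0 < n := by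
      rcases Nat.eq_zero_or_pos n with h | h
      · exact absurd (by simp [h]) h0
      · exact h
    unfold square_digits square_digits_alt
    rw [if_neg h0]
    simp only [Int.toNat_natCast]
    rw [sdLoopA_eq n [], List.nil_append, PySem.List.slice?_none_none_neg_one, Option.getD_some]
    rw [PySem.Int.toList_toStr]
    have htc : PySem.Int.toChars (n : Int) = Nat.toDigits 10 n := by
      unfold PySem.Int.toChars
      rw [if_neg (by omega), Int.toNat_natCast]
    rw [htc, toDigits_eq n hn]
    have hmap : (((Nat.digits 10 n).map Nat.digitChar).reverse).map
          (fun c => PySem.Int.toStr (((PySem.Int.ofStr? (String.ofList [c])).getD 0) ^ 2))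
        = (((Nat.digits 10 n).map (fun d : Nat => ((d : Int))^2)).reverse).map PySem.Int.toStr := by
      rw [List.map_reverse, List.map_reverse]
      congr 1
      rw [List.map_map, List.map_map]
      refine List.map_congr_left (fun d hd => ?_)
      have h10 : d < 10 := Nat.digits_lt_base (by norm_num) hd
      simp only [Function.comp_apply]
      rw [digitChar_val d h10]
    rw [hmap]
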